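-- pv_equiv track=rewrite | github.com/DrElegantia/prova | build_pil_dashboard.py | _find_geo_time_col
-- ===== SOURCE A (Python) =====
-- def _find_geo_time_col(columns) -> str:
--     cols = list(columns)
--     if "geo\\TIME_PERIOD" in cols:
--         return "geo\\TIME_PERIOD"
--     for c in cols:
--         sc = str(c)
--         if ("geo" in sc.lower()) and ("time_period" in sc.lower()):
--             return c
--     for c in cols:
--         sc = str(c)
--         if ("geo" in sc.lower()) and ("time" in sc.lower()):
--             return c
--     for c in cols:
--         if str(c).strip().lower() == "geo":
--             return c
--     raise ValueError("Colonna geo non trovata nel dataset")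
-- ===== SOURCE B (Python) =====
-- def _find_geo_time_col(columns) -> str:
--     cols = list(columns)
--     exact = False
--     best_tp = best_t = best_geo = None
--     for c in cols:
--         sc = str(c).lower()
--         if not exact and c == "geo\\TIME_PERIOD":
--             exact = True
--         if best_tp is None and "geo" in sc and "time_period" in sc:
--             best_tp = c
--         if best_t is None and "geo" in sc and "time" in sc:
--             best_t = c
--         if best_geo is None and str(c).strip().lower() == "geo":
--             best_geo = c
--     if exact:
--         return "geo\\TIME_PERIOD"
--     for best in (best_tp, best_t, best_geo):
--         if best is not None:
--             return best
--     raise ValueError("Colonna geo non trovata nel dataset")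
-- ===== Notes on version B (the rewrite author's own statement) =====
-- stated objective: alternative
-- what changed: Replaces A's exact-literal membership test plus three sequential tiered scans with a single pass that maintains an exact-match flag and three first-match slots, followed by one priority-order selection.
import Mathlib
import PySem

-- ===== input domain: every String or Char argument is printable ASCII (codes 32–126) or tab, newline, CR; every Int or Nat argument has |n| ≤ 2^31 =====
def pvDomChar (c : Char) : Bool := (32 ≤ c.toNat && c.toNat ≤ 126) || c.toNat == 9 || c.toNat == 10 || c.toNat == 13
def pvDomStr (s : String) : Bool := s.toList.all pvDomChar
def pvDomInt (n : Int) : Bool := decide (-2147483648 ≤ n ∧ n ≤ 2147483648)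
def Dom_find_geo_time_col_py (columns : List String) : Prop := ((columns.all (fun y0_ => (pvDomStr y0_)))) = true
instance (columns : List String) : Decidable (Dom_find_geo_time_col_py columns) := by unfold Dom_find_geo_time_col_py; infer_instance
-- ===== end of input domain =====

-- B replaces A's literal-membership test plus three sequential tiered scans by ONE pass keeping
-- an exact-match flag and three first-match slots, then a single priority-order selection
-- (objective: alternative decomposition, same asymptotic cost).

-- shared predicate helpers (the same Python tests appear verbatim in both versions)
def pvPredTP (c : String) : Bool :=
  PySem.Str.isIn "geo" (PySem.Str.lower c) && PySem.Str.isIn "time_period" (PySem.Str.lower c)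
def pvPredT (c : String) : Bool :=
  PySem.Str.isIn "geo" (PySem.Str.lower c) && PySem.Str.isIn "time" (PySem.Str.lower c)
def pvPredG (c : String) : Bool :=
  PySem.Str.lower (PySem.Str.strip c) == "geo"

-- ===== PORT A =====
-- literal transliteration of A: membership test, then three sequential first-match scans
-- (a Python for-loop with an immediate return is List.find?); "" stands for the unreachable
-- ValueError branch, which Pre_ excludes.
def find_geo_time_col_py (columns : List String) : String :=
  let cols := columns
  if cols.any (fun c => c == "geo\\TIME_PERIOD") then "geo\\TIME_PERIOD"
  else
    match cols.find? (fun c => pvPredTP c) with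
    | some c => c
    | none =>
      match cols.find? (fun c => pvPredT c) with
      | some c => c
      | none =>
        match cols.find? (fun c => pvPredG c) with
        | some c => c
        | none => ""   -- raise ValueError("Colonna geo non trovata nel dataset")

-- ===== PORT B =====
-- one fold keeping (exact flag, best_tp, best_t, best_geo), then priority selection
def pvSlot (cur : Option String) (p : String → Bool) (c : String) : Option String :=
  match cur with
  | some x => some x
  | none => if p c then some c else none

def pvStep (s : Bool × Option String × Option String × Option String) (c : String) :
    Bool × Option String × Option String × Option String :=
  (s.1 || (c == "geo\\TIME_PERIOD"),
   pvSlot s.2.1 pvPredTP c,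
   pvSlot s.2.2.1 pvPredT c,
   pvSlot s.2.2.2 pvPredG c)

def find_geo_time_col_py_alt (columns : List String) : String :=
  let st := columns.foldl pvStep (false, none, none, none)
  if st.1 then "geo\\TIME_PERIOD"
  else
    match st.2.1 with
    | some b => b
    | none =>
      match st.2.2.1 with
      | some b => b
      | none =>
        match st.2.2.2 with
        | some b => b
        | none => ""   -- raise ValueError("Colonna geo non trovata nel dataset")

-- ===== PRECONDITION & SPEC =====
-- Pre_ excludes exactly the inputs with no matching column, on which the Python A
-- raises ValueError (the exact literal itself satisfies pvPredTP, so it is covered).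
def Pre_find_geo_time_col_py (columns : List String) : Prop :=
  columns.any (fun c => pvPredTP c || pvPredT c || pvPredG c) = true
instance (columns : List String) : Decidable (Pre_find_geo_time_col_py columns) := by
  unfold Pre_find_geo_time_col_py; infer_instance

def pvWitness_find_geo_time_col_py : List String := ["id", "geo\\TIME_PERIOD", "value"]

def Spec_find_geo_time_col_py (columns : List String) (out : String) : Prop :=
  out = find_geo_time_col_py_alt columns
instance (columns : List String) (out : String) : Decidable (Spec_find_geo_time_col_py columns out) := by
  unfold Spec_find_geo_time_col_py; infer_instance

-- ===== CLAIM (what is proved, stated in full; the proofs are below) =====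
def Claim_equal_find_geo_time_col_py : Prop := ∀ (columns : List String), Dom_find_geo_time_col_py columns → Pre_find_geo_time_col_py columns → Spec_find_geo_time_col_py columns (find_geo_time_col_py columns)

-- ===== LEMMAS AND PROOFS =====

-- first-match combination: feeding one element into a slot then continuing equals
-- prepending that element to the find? scan
theorem pvSlot_first (a : Option String) (p : String → Bool) (h : String) (t : List String) :
    (match pvSlot a p h with
      | some x => some x
      | none => t.find? p) =
    (match a with
      | some x => some x
      | none => (h :: t).find? p) := by
  cases a with
  | some x => rfl
  | none =>
    simp only [pvSlot, List.find?_cons]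
    by_cases hp : p h = true <;> simp [hp]

-- the single fold computes exactly the exact-flag and the three tiered first matches
theorem pvFold_char (l : List String) (e : Bool) (a b g : Option String) :
    l.foldl pvStep (e, a, b, g) =
      (e || l.any (fun c => c == "geo\\TIME_PERIOD"),
       (match a with | some x => some x | none => l.find? (fun c => pvPredTP c)),
       (match b with | some x => some x | none => l.find? (fun c => pvPredT c)),
       (match g with | some x => some x | none => l.find? (fun c => pvPredG c))) := by
  induction l generalizing e a b g with
  | nil => cases a <;> cases b <;> cases g <;> simp
  | cons h t ih =>
    simp only [List.foldl_cons, pvStep, ih, List.any_cons, Bool.or_assoc]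
    refine congrArg (fun x => (_, x)) ?_
    refine congrArg₂ (fun x y => (x, y)) (pvSlot_first a pvPredTP h t) ?_
    exact congrArg₂ (fun x y => (x, y)) (pvSlot_first b pvPredT h t)
      (pvSlot_first g pvPredG h t)

-- ===== VERDICT (by name: the statement is the Claim_ definition above) =====
theorem find_geo_time_col_py_spec : Claim_equal_find_geo_time_col_py := by
  intro columns _ _
  unfold Spec_find_geo_time_col_py find_geo_time_col_py find_geo_time_col_py_alt
  rw [pvFold_char]
  rfl
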